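-- pv_equiv track=rewrite | github.com/zaviermiller/DailyCodingProblems | dcp_002.py | weirdify_array_no_division
-- ===== SOURCE A (Python) =====
-- def weirdify_array_no_division(arr):
--     new_arr = []
--
--     for i in arr:
--         value = 1
--         for j in arr:
--             if j != i:
--                 value *= j
--         new_arr.append(int(value))
--     return new_arr
-- ===== SOURCE B (Python) =====
-- def weirdify_array_no_division(arr):
--     # O(n + d^2-free): group equal values, then prefix/suffix sweeps over the
--     # distinct values; each element's answer is looked up by value.
--     counts = {}
--     for x in arr:
--         counts[x] = counts.get(x, 0) + 1
--     pows = {v: v ** c for v, c in counts.items()}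
--     sufs = {}
--     suf = 1
--     for v in reversed(list(pows)):
--         sufs[v] = suf
--         suf *= pows[v]
--     res = {}
--     pre = 1
--     for v in pows:
--         res[v] = pre * sufs[v]
--         pre *= pows[v]
--     return [res[x] for x in arr]
-- ===== Notes on version B (the rewrite author's own statement) =====
-- stated objective: faster
-- what changed: Replaces the O(n^2) nested product loop by grouping equal values in a dict and doing prefix/suffix product sweeps over the distinct values, with a per-element lookup.
import Mathlib
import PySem

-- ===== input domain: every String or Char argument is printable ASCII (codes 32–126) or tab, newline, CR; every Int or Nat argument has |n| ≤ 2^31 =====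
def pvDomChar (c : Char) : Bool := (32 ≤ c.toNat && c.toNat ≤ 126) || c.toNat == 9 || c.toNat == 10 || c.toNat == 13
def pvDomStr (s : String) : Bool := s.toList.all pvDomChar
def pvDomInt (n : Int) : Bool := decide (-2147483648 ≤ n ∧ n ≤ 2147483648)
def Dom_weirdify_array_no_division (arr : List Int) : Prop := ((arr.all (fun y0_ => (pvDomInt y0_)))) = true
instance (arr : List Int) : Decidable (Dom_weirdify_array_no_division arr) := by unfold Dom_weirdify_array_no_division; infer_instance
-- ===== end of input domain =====

-- B replaces A's O(n^2) nested product loop by grouping equal values and doing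
-- prefix/suffix product sweeps over the distinct values (faster).

-- ===== PORT A =====
-- for each i, multiply every j ≠ i; int(value) is the identity on ints
def weirdify_array_no_division (arr : List Int) : List Int :=
  arr.foldl
    (fun new_arr i =>
      new_arr ++ [arr.foldl (fun value j => if j ≠ i then value * j else value) 1])
    []

-- ===== PORT B =====
-- counts = {}; for x in arr: counts[x] = counts.get(x, 0) + 1
-- pows = {v: v ** c for v, c in counts.items()}        (c ≥ 1 always, so toNat is exact)
-- sufs/res sweeps; pows[v], sufs[v], res[x] are lookups of keys always present,
-- ported as getD (never falls back to the default on these inputs)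
def weirdify_array_no_division_alt (arr : List Int) : List Int :=
  let counts : PySem.Dict Int Int :=
    arr.foldl (fun d x => d.insert x (d.getD x 0 + 1)) PySem.Dict.empty
  let pows : PySem.Dict Int Int :=
    counts.items.foldl (fun d p => d.insert p.1 (p.1 ^ p.2.toNat)) PySem.Dict.empty
  let sufsP : Int × PySem.Dict Int Int :=
    (pows.keys.reverse).foldl
      (fun sd v => (sd.1 * pows.getD v 1, sd.2.insert v sd.1)) (1, PySem.Dict.empty)
  let resP : Int × PySem.Dict Int Int :=
    pows.keys.foldl
      (fun pd v => (pd.1 * pows.getD v 1, pd.2.insert v (pd.1 * sufsP.2.getD v 1)))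
      (1, PySem.Dict.empty)
  arr.map (fun x => resP.2.getD x 0)

-- ===== PRECONDITION & SPEC =====
def Spec_weirdify_array_no_division (arr : List Int) (out : List Int) : Prop := out = weirdify_array_no_division_alt arr
instance (arr : List Int) (out : List Int) : Decidable (Spec_weirdify_array_no_division arr out) := by unfold Spec_weirdify_array_no_division; infer_instance

-- ===== CLAIM (what is proved, stated in full; the proofs are below) =====
def Claim_equal_weirdify_array_no_division : Prop := ∀ (arr : List Int), Dom_weirdify_array_no_division arr → Spec_weirdify_array_no_division arr (weirdify_array_no_division arr)

-- ===== LEMMAS AND PROOFS =====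

-- A's inner loop is the product of the elements different from i
theorem wadA_inner (arr : List Int) (i : Int) :
    arr.foldl (fun value j => if j ≠ i then value * j else value) 1
      = (arr.filter (fun j => decide (j ≠ i))).prod := by
  rw [PySem.List.foldl_ite_eq_foldl_filter (fun j => j ≠ i) (· * ·) arr 1,
      List.prod_eq_foldl]

theorem wadA_eq_map (arr : List Int) :
    weirdify_array_no_division arr
      = arr.map (fun i => (arr.filter (fun j => decide (j ≠ i))).prod) := by
  unfold weirdify_array_no_division
  rw [PySem.List.foldl_append_singleton_eq_map]
  exact List.map_congr_left (fun i _ => wadA_inner arr i)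

-- a fold that never touches key v leaves its entry alone
theorem wad_res_untouched (f g : Int → Int) :
    ∀ (ks : List Int) (pre : Int) (d : PySem.Dict Int Int) (v : Int), v ∉ ks →
      (ks.foldl (fun pd w => (pd.1 * f w, pd.2.insert w (pd.1 * g w))) (pre, d)).2.getD v 0
        = d.getD v 0 := by
  intro ks
  induction ks with
  | nil => intro pre d v _; rfl
  | cons k t ih =>
      intro pre d v hv
      simp only [List.mem_cons, not_or] at hv
      simp only [List.foldl_cons]
      rw [ih _ _ _ hv.2, PySem.Dict.getD_insert_of_ne _ _ _ hv.1]

-- the res sweep: the entry at v is pre · (product of f before v) · g v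
theorem wad_res_getD (f g : Int → Int) :
    ∀ (l₁ : List Int) (v : Int) (l₂ : List Int) (pre : Int) (d : PySem.Dict Int Int),
      v ∉ l₁ → v ∉ l₂ →
      ((l₁ ++ v :: l₂).foldl (fun pd w => (pd.1 * f w, pd.2.insert w (pd.1 * g w))) (pre, d)).2.getD v 0
        = pre * (l₁.map f).prod * g v := by
  intro l₁
  induction l₁ with
  | nil =>
      intro v l₂ pre d _ hv2
      simp only [List.nil_append, List.foldl_cons]
      rw [wad_res_untouched f g l₂ _ _ v hv2, PySem.Dict.getD_insert_self]
      simp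
  | cons k t ih =>
      intro v l₂ pre d hv1 hv2
      simp only [List.mem_cons, not_or] at hv1
      simp only [List.cons_append, List.foldl_cons]
      rw [ih v l₂ _ _ hv1.2 hv2]
      simp [mul_assoc, mul_comm, mul_left_comm]

-- the sufs sweep (a foldl over the reversed key list): entry at v is the
-- product of f over the keys after v
theorem wad_sufs_fst (f : Int → Int) :
    ∀ (ks : List Int) (s : Int) (d : PySem.Dict Int Int),
      (ks.foldr (fun v sd => (sd.1 * f v, sd.2.insert v sd.1)) (s, d)).1
        = (ks.map f).prod * s := by
  intro ks
  induction ks with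
  | nil => intro s d; simp
  | cons k t ih => intro s d; simp [ih, mul_comm, mul_left_comm]

theorem wad_sufs_getD (f : Int → Int) :
    ∀ (ks : List Int), ks.Nodup →
      ∀ (l₁ : List Int) (v : Int) (l₂ : List Int), ks = l₁ ++ v :: l₂ →
      (ks.foldr (fun w sd => (sd.1 * f w, sd.2.insert w sd.1)) (1, PySem.Dict.empty)).2.getD v 1
        = (l₂.map f).prod := by
  intro ks
  induction ks with
  | nil => intro _ l₁ v l₂ h; exact absurd h (by simp)
  | cons k t ih =>
      intro hnd l₁ v l₂ h
      cases l₁ with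
      | nil =>
          simp only [List.nil_append, List.cons.injEq] at h
          obtain ⟨rfl, rfl⟩ := h
          simp only [List.foldr_cons, PySem.Dict.getD_insert_self]
          rw [wad_sufs_fst, mul_one]
      | cons k' t' =>
          simp only [List.cons_append, List.cons.injEq] at h
          obtain ⟨rfl, rfl⟩ := h
          have hnd' := List.nodup_cons.mp hnd
          have hvt : v ∈ t' ++ v :: l₂ := by simp
          have hne : v ≠ k := fun hvk => hnd'.1 (hvk ▸ hvt)
          simp only [List.foldr_cons]
          rw [PySem.Dict.getD_insert_of_ne _ _ _ hne]
          exact ih hnd'.2 t' v l₂ rfl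

-- grouping: the product of a list equals the product of v^(count v) over any
-- duplicate-free enumeration of its members
theorem wad_group :
    ∀ (ks m : List Int), ks.Nodup → (∀ v, v ∈ ks ↔ v ∈ m) →
      (ks.map (fun v => v ^ m.count v)).prod = m.prod := by
  intro ks
  induction ks with
  | nil =>
      intro m _ hmem
      have hm : m = [] := List.eq_nil_iff_forall_not_mem.mpr
        (fun v hv => List.not_mem_nil ((hmem v).mpr hv))
      simp [hm]
  | cons k t ih =>
      intro m hnd hmem
      have hnd' := List.nodup_cons.mp hnd
      have hperm : m.Perm (m.filter (fun x => decide (x = k)) ++ m.filter (fun x => decide (¬ x = k))) := by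
        simpa using (List.filter_append_perm (fun x => decide (x = k)) m).symm
      have hprod : m.prod = (m.filter (fun x => decide (x = k))).prod * (m.filter (fun x => decide (¬ x = k))).prod := by
        rw [hperm.prod_eq, List.prod_append]
      have hall : ∀ x ∈ m.filter (fun x => decide (x = k)), x = k := by
        intro x hx; simpa using (List.of_mem_filter hx)
      have hlen : (m.filter (fun x => decide (x = k))).length = m.count k := by
        rw [List.count_eq_length_filter]
        rfl
      have hcnt : ∀ v ∈ t, (m.filter (fun x => decide (¬ x = k))).count v = m.count v := by
        intro v hv
        have hvk : v ≠ k := fun h => hnd'.1 (h ▸ hv)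
        rw [List.count_filter]
        simp [hvk]
      have hmem' : ∀ v, v ∈ t ↔ v ∈ m.filter (fun x => decide (¬ x = k)) := by
        intro v
        constructor
        · intro hv
          have hvk : v ≠ k := fun h => hnd'.1 (h ▸ hv)
          exact List.mem_filter.mpr ⟨(hmem v).mp (List.mem_cons_of_mem _ hv), by simp [hvk]⟩
        · intro hv
          rcases List.mem_filter.mp hv with ⟨hvm, hvk⟩
          have hvk' : v ≠ k := by simpa using hvk
          rcases List.mem_cons.mp ((hmem v).mpr hvm) with h | h
          · exact absurd h hvk'
          · exact h
      have := ih (m.filter (fun x => decide (¬ x = k))) hnd'.2 hmem'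
      calc ((k :: t).map (fun v => v ^ m.count v)).prod
          = k ^ m.count k * (t.map (fun v => v ^ m.count v)).prod := by simp
        _ = (m.filter (fun x => decide (x = k))).prod * (m.filter (fun x => decide (¬ x = k))).prod := by
            rw [List.prod_eq_pow_card _ k hall, hlen]
            congr 1
            rw [← this]
            exact congrArg List.prod (List.map_congr_left (fun v hv => by rw [hcnt v hv]))
        _ = m.prod := hprod.symm

-- core of B: for x ∈ arr the res entry at x is the product of the elements ≠ x
theorem wadB_core (arr : List Int) (P : PySem.Dict Int Int)
    (hkeys : P.keys = PySem.Set.ofList arr)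
    (hpw : ∀ v ∈ PySem.Set.ofList arr, P.getD v 1 = v ^ arr.count v)
    (x : Int) (hx : x ∈ arr) :
    (List.foldl
        (fun pd v => (pd.1 * P.getD v 1,
          pd.2.insert v (pd.1 *
            (List.foldr (fun w sd => (sd.1 * P.getD w 1, sd.2.insert w sd.1))
              (1, PySem.Dict.empty) P.keys).2.getD v 1)))
        (1, PySem.Dict.empty) P.keys).2.getD x 0
      = (arr.filter (fun j => decide (j ≠ x))).prod := by
  have hxks : x ∈ PySem.Set.ofList arr := (PySem.Set.mem_ofList arr x).mpr hx
  obtain ⟨l₁, l₂, hsplit⟩ := List.append_of_mem hxks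
  have hnd2 : (l₁ ++ x :: l₂).Nodup := hsplit ▸ PySem.Set.nodup_ofList arr
  have hnd3 := List.nodup_append.mp hnd2
  have hxl₂ : x ∉ l₂ := (List.nodup_cons.mp hnd3.2.1).1
  have hxl₁ : x ∉ l₁ := fun h => hnd3.2.2 x h x (List.mem_cons_self) rfl
  have hvne : ∀ v ∈ l₁ ++ l₂, v ≠ x := by
    intro v hv hvx
    subst hvx
    rcases List.mem_append.mp hv with h | h
    · exact hxl₁ h
    · exact hxl₂ h
  have hmemks : ∀ v ∈ l₁ ++ l₂, v ∈ PySem.Set.ofList arr := by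
    intro v hv
    rw [hsplit]
    rcases List.mem_append.mp hv with h | h
    · exact List.mem_append_left _ h
    · exact List.mem_append_right _ (List.mem_cons_of_mem _ h)
  rw [hkeys, hsplit]
  have hsufs :
      (List.foldr (fun w sd => (sd.1 * P.getD w 1, sd.2.insert w sd.1))
          (1, PySem.Dict.empty) (l₁ ++ x :: l₂)).2.getD x 1
        = (l₂.map (fun v => P.getD v 1)).prod :=
    wad_sufs_getD (fun v => P.getD v 1) (l₁ ++ x :: l₂) hnd2 l₁ x l₂ rfl
  have hres :
      (List.foldl
          (fun pd v => (pd.1 * P.getD v 1,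
            pd.2.insert v (pd.1 *
              (List.foldr (fun w sd => (sd.1 * P.getD w 1, sd.2.insert w sd.1))
                (1, PySem.Dict.empty) (l₁ ++ x :: l₂)).2.getD v 1)))
          (1, PySem.Dict.empty) (l₁ ++ x :: l₂)).2.getD x 0
        = 1 * (l₁.map (fun v => P.getD v 1)).prod *
            (List.foldr (fun w sd => (sd.1 * P.getD w 1, sd.2.insert w sd.1))
              (1, PySem.Dict.empty) (l₁ ++ x :: l₂)).2.getD x 1 :=
    wad_res_getD (fun v => P.getD v 1)
      (fun v => (List.foldr (fun w sd => (sd.1 * P.getD w 1, sd.2.insert w sd.1))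
        (1, PySem.Dict.empty) (l₁ ++ x :: l₂)).2.getD v 1)
      l₁ x l₂ 1 PySem.Dict.empty hxl₁ hxl₂
  rw [hres, hsufs, one_mul]
  -- replace the dict lookups by v ^ count v on both halves
  have hmapf : ∀ l : List Int, (∀ v ∈ l, v ∈ l₁ ++ l₂) →
      l.map (fun v => P.getD v 1) = l.map (fun v => v ^ arr.count v) :=
    fun l hl => List.map_congr_left (fun v hv => hpw v (hmemks v (hl v hv)))
  rw [hmapf l₁ (fun v hv => List.mem_append_left _ hv),
      hmapf l₂ (fun v hv => List.mem_append_right _ hv)]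
  -- group the filtered product by distinct values
  have hnd12 : (l₁ ++ l₂).Nodup :=
    hnd2.sublist ((List.sublist_cons_self x l₂).append_left l₁)
  have hmem12 : ∀ v, v ∈ l₁ ++ l₂ ↔ v ∈ arr.filter (fun j => decide (j ≠ x)) := by
    intro v
    constructor
    · intro hv
      exact List.mem_filter.mpr
        ⟨(PySem.Set.mem_ofList arr v).mp (hmemks v hv), by simp [hvne v hv]⟩
    · intro hv
      rcases List.mem_filter.mp hv with ⟨hvm, hvx⟩
      have hvx' : v ≠ x := by simpa using hvx
      have : v ∈ l₁ ++ x :: l₂ := hsplit ▸ (PySem.Set.mem_ofList arr v).mpr hvm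
      rcases List.mem_append.mp this with h | h
      · exact List.mem_append_left _ h
      · rcases List.mem_cons.mp h with h | h
        · exact absurd h hvx'
        · exact List.mem_append_right _ h
  have hgrp := wad_group (l₁ ++ l₂) (arr.filter (fun j => decide (j ≠ x))) hnd12 hmem12
  have hcnt : (l₁ ++ l₂).map (fun v => v ^ (arr.filter (fun j => decide (j ≠ x))).count v)
      = (l₁ ++ l₂).map (fun v => v ^ arr.count v) :=
    List.map_congr_left (fun v hv => by
      rw [List.count_filter (by simp [hvne v hv])])
  rw [hcnt] at hgrp
  rw [← hgrp, List.map_append, List.prod_append]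

-- B returns, for each element, the product of the elements different from it
theorem wadB_eq_map (arr : List Int) :
    weirdify_array_no_division_alt arr
      = arr.map (fun x => (arr.filter (fun j => decide (j ≠ x))).prod) := by
  unfold weirdify_array_no_division_alt
  simp only [PySem.Dict.foldl_insert_getD_add_one_eq_counter, List.foldl_reverse]
  have hitems : (List.foldl (fun d p => d.insert p.1 (p.1 ^ p.2.toNat)) PySem.Dict.empty
        (PySem.Dict.counter arr).items).items
      = (PySem.Set.ofList arr).map (fun k => (k, k ^ arr.count k)) := by
    rw [PySem.Dict.items_counter]
    refine Eq.trans (PySem.Dict.items_foldl_insert_fresh _ Prod.fst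
      (fun p : Int × Int => p.1 ^ p.2.toNat) PySem.Dict.empty ?_ ?_) ?_
    · intro a _; exact PySem.Dict.contains_empty (ν := Int) a.1
    · simp [List.map_map, Function.comp_def]
    · simp [PySem.Dict.empty, List.map_map, Function.comp_def]
  have hkeys : (List.foldl (fun d p => d.insert p.1 (p.1 ^ p.2.toNat)) PySem.Dict.empty
        (PySem.Dict.counter arr).items).keys = PySem.Set.ofList arr := by
    simp only [PySem.Dict.keys, hitems, List.map_map]
    simp [Function.comp_def]
  have hpw : ∀ v ∈ PySem.Set.ofList arr,
      (List.foldl (fun d p => d.insert p.1 (p.1 ^ p.2.toNat)) PySem.Dict.empty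
        (PySem.Dict.counter arr).items).getD v 1 = v ^ arr.count v := by
    intro v hv
    exact PySem.Dict.getD_of_mem_items _
      (by rw [hitems]; exact List.mem_map_of_mem hv) (by rw [hkeys]; exact PySem.Set.nodup_ofList arr) 1
  exact List.map_congr_left (fun x hx => wadB_core arr _ hkeys hpw x hx)

-- ===== VERDICT (by name: the statement is the Claim_ definition above) =====
theorem weirdify_array_no_division_spec : Claim_equal_weirdify_array_no_division := by
  intro arr _
  unfold Spec_weirdify_array_no_division
  rw [wadA_eq_map, wadB_eq_map]
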